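-- pv_equiv track=rewrite | github.com/tr1ten/DNA | companies/amazon/a.py | solve
-- ===== SOURCE A (Python) =====
-- import math
--
-- def solve(A):
--     res = 0
--     c = dict()
--     for x in A:
--         if x in c:
--             res += c[x]
--             c[x] = math.ceil(c[x]/2)
--         else:
--             res +=x
--             c[x] = math.ceil(x/2)
--     return res
-- ===== SOURCE B (Python) =====
-- def solve(A):
--     # two-phase: tabulate counts first, then sum each value's halving chain
--     counts = {}
--     for x in A:
--         counts[x] = counts.get(x, 0) + 1
--     res = 0
--     for v, n in counts.items():
--         cur = v
--         res += cur
--         for _ in range(n - 1):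
--             cur = -(-cur // 2)
--             res += cur
--     return res
-- ===== Notes on version B (the rewrite author's own statement) =====
-- stated objective: alternative
-- what changed: Replaces A's single streaming pass with a per-value running dict of halved values by a two-phase tabulate-then-compute structure: build a frequency table, then for each distinct value run its halving chain for its count, using exact integer ceiling division instead of float math.ceil.
import Mathlib
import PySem

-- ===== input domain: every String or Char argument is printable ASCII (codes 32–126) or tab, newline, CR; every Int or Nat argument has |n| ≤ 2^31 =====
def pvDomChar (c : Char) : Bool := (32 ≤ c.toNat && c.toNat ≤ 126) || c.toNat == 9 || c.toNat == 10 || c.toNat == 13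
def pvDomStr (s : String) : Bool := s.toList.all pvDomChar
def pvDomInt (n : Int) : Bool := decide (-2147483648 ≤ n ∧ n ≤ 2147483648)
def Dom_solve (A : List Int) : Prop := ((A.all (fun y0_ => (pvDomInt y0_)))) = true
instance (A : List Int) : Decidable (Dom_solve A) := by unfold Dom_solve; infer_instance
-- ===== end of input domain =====

-- B restructures A's one-pass seen-dict loop into counts-table-then-per-value-halving-chains (alternative decomposition, same result).

-- math.ceil(t/2) as integer ceiling division -((-t)//2); exact here since float division by 2 is
-- exact for the magnitudes that occur on Dom (|t| ≤ 2^31, and chain values only shrink).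
def ceilHalf (t : Int) : Int := -(PySem.Int.floordiv (-t) 2)

-- ===== PORT A =====
def solve (A : List Int) : Int :=
  (A.foldl (fun (s : Int × PySem.Dict Int Int) x =>
      if s.2.contains x then
        (s.1 + s.2.getD x 0, s.2.insert x (ceilHalf (s.2.getD x 0)))
      else
        (s.1 + x, s.2.insert x (ceilHalf x)))
    (0, PySem.Dict.empty)).1

-- ===== PORT B =====
def solve_alt (A : List Int) : Int :=
  let counts := A.foldl (fun (d : PySem.Dict Int Int) x => d.insert x (d.getD x 0 + 1)) PySem.Dict.empty
  counts.items.foldl (fun res p =>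
      ((PySem.List.pyRange 0 (p.2 - 1) 1).foldl
         (fun (s : Int × Int) _ => (ceilHalf s.1, s.2 + ceilHalf s.1))
         (p.1, res + p.1)).2) 0

-- ===== PRECONDITION & SPEC =====
def Spec_solve (A : List Int) (out : Int) : Prop := out = solve_alt A
instance (A : List Int) (out : Int) : Decidable (Spec_solve A out) := by unfold Spec_solve; infer_instance

-- ===== CLAIM (what is proved, stated in full; the proofs are below) =====
def Claim_equal_solve : Prop := ∀ (A : List Int), Dom_solve A → Spec_solve A (solve A)

-- ===== LEMMAS AND PROOFS =====

-- i-th element of the halving chain starting at v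
def iterH : Nat → Int → Int
  | 0, v => v
  | n + 1, v => ceilHalf (iterH n v)

-- sum of the first n chain elements
def cs (v : Int) : Nat → Int
  | 0 => 0
  | n + 1 => cs v n + iterH n v

theorem iterH_shift (n : Nat) (v : Int) : iterH n (ceilHalf v) = iterH (n + 1) v := by
  induction n with
  | zero => rfl
  | succ n ih => simp [iterH, ih]

theorem cs_front (v : Int) (n : Nat) : cs v (n + 1) = v + cs (ceilHalf v) n := by
  induction n with
  | zero => simp [cs, iterH]
  | succ n ih =>
    calc cs v (n + 2) = cs v (n + 1) + iterH (n + 1) v := rfl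
      _ = v + cs (ceilHalf v) n + iterH n (ceilHalf v) := by rw [ih, iterH_shift]
      _ = v + cs (ceilHalf v) (n + 1) := by simp [cs]; ring

-- the inner per-value loop of B, over any list (it ignores the elements)
theorem inner_fold {α : Type} (L : List α) (cur res : Int) :
    L.foldl (fun (s : Int × Int) _ => (ceilHalf s.1, s.2 + ceilHalf s.1)) (cur, res)
      = (iterH L.length cur, res + cs (ceilHalf cur) L.length) := by
  induction L generalizing cur res with
  | nil => simp [cs, iterH]
  | cons a t ih =>
    simp only [List.foldl_cons, List.length_cons, ih]
    rw [iterH_shift, cs_front, add_assoc]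

-- A's total, parametrised by how many times each value was already seen
def T : List Int → (Int → Nat) → Int
  | [], _ => 0
  | x :: xs, m => iterH (m x) x + T xs (fun v => if v = x then m v + 1 else m v)

theorem A_run (A : List Int) (res : Int) (c : PySem.Dict Int Int) (m : Int → Nat)
    (hinv : ∀ v, c.get? v = if m v = 0 then none else some (iterH (m v) v)) :
    (A.foldl (fun (s : Int × PySem.Dict Int Int) x =>
      if s.2.contains x then
        (s.1 + s.2.getD x 0, s.2.insert x (ceilHalf (s.2.getD x 0)))
      else
        (s.1 + x, s.2.insert x (ceilHalf x))) (res, c)).1 = res + T A m := by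
  induction A generalizing res c m with
  | nil => simp [T]
  | cons x t ih =>
    have hcont : c.contains x = (c.get? x).isSome := PySem.Dict.contains_eq_isSome_get? c x
    by_cases hm : m x = 0
    · have hget : c.get? x = none := by rw [hinv x, if_pos hm]
      have hcf : c.contains x = false := by simp [hcont, hget]
      simp only [List.foldl_cons, hcf, Bool.false_eq_true, if_false]
      rw [ih _ _ (fun v => if v = x then m v + 1 else m v) ?_]
      · simp only [T]
        rw [hm]
        simp only [iterH]
        ring
      · intro v
        rw [PySem.Dict.get?_insert]
        by_cases hv : v = x
        · subst hv; simp [hm, iterH]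
        · simp only [hv, if_false]
          rw [hinv v]
    · have hget : c.get? x = some (iterH (m x) x) := by rw [hinv x, if_neg hm]
      have hc : c.contains x = true := by simp [hcont, hget]
      have hgd : c.getD x 0 = iterH (m x) x := PySem.Dict.getD_of_get?_eq_some c 0 hget
      simp only [List.foldl_cons, hc, if_true, hgd]
      rw [ih _ _ (fun v => if v = x then m v + 1 else m v) ?_]
      · simp only [T]; ring
      · intro v
        rw [PySem.Dict.get?_insert]
        by_cases hv : v = x
        · subst hv; simp [iterH]
        · simp only [hv, if_false]
          rw [hinv v]

-- B's total: sum over distinct values of the chain of length count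
def S (A : List Int) : Int :=
  ((PySem.Set.ofList A).map (fun v => cs v (A.count v))).sum

theorem T_append (xs : List Int) (x : Int) (m : Int → Nat) :
    T (xs ++ [x]) m = T xs m + iterH (m x + xs.count x) x := by
  induction xs generalizing m with
  | nil => simp [T]
  | cons y t ih =>
    have harg : (if x = y then m x + 1 else m x) + List.count x t
        = m x + List.count x (y :: t) := by
      rw [List.count_cons]
      by_cases hxy : x = y
      · simp [hxy, eq_comm]; omega
      · have hyx : ¬ y = x := fun h => hxy h.symm
        simp [hxy, hyx]
    simp only [List.cons_append, T, ih, add_assoc]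
    rw [harg]

theorem sum_map_update {l : List Int} {f g : Int → Int} {x d : Int}
    (hn : l.Nodup) (hx : x ∈ l) (hfg : ∀ v ∈ l, v ≠ x → f v = g v)
    (hd : f x = g x + d) : (l.map f).sum = (l.map g).sum + d := by
  induction l with
  | nil => simp at hx
  | cons a t ih =>
    simp only [List.nodup_cons] at hn
    rcases List.mem_cons.mp hx with rfl | hxt
    · have hrest : ∀ v ∈ t, f v = g v := fun v hv =>
        hfg v (List.mem_cons_of_mem _ hv) (fun h => hn.1 (h ▸ hv))
      simp [List.map_congr_left hrest, hd]; ring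
    · have ha : a ≠ x := fun h => hn.1 (h ▸ hxt)
      have := ih hn.2 hxt (fun v hv hvx => hfg v (List.mem_cons_of_mem _ hv) hvx)
      simp [this, hfg a (List.mem_cons_self) ha]; ring

theorem S_append (xs : List Int) (x : Int) :
    S (xs ++ [x]) = S xs + iterH (xs.count x) x := by
  have hofl : PySem.Set.ofList (xs ++ [x]) = PySem.Set.add (PySem.Set.ofList xs) x := by
    rw [PySem.Set.ofList_eq_foldl, PySem.Set.ofList_eq_foldl, List.foldl_append]
    rfl
  have hcnt : ∀ v : Int, (xs ++ [x]).count v = xs.count v + if x = v then 1 else 0 := by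
    intro v; simp [List.count_append, List.count_singleton, beq_iff_eq]
  by_cases hmem : x ∈ xs
  · have hadd : PySem.Set.add (PySem.Set.ofList xs) x = PySem.Set.ofList xs := by
      simp [PySem.Set.add, hmem]
    rw [S, hofl, hadd]
    have hsum := sum_map_update (l := PySem.Set.ofList xs)
      (f := fun v => cs v ((xs ++ [x]).count v))
      (g := fun v => cs v (xs.count v)) (x := x) (d := iterH (xs.count x) x)
      (PySem.Set.nodup_ofList xs) ((PySem.Set.mem_ofList xs x).mpr hmem)
      (by intro v _ hvx
          show cs v ((xs ++ [x]).count v) = cs v (xs.count v)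
          rw [hcnt v, if_neg (fun h => hvx h.symm), Nat.add_zero])
      (by show cs x ((xs ++ [x]).count x) = cs x (xs.count x) + iterH (xs.count x) x
          rw [hcnt x, if_pos rfl]
          rfl)
    rw [hsum]; rfl
  · have hadd : PySem.Set.add (PySem.Set.ofList xs) x = PySem.Set.ofList xs ++ [x] := by
      simp [PySem.Set.add, hmem]
    rw [S, hofl, hadd, List.map_append, List.sum_append]
    have hcx : xs.count x = 0 := List.count_eq_zero.mpr hmem
    have h1 : ∀ v ∈ PySem.Set.ofList xs,
        (fun v => cs v ((xs ++ [x]).count v)) v = (fun v => cs v (xs.count v)) v := by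
      intro v hv
      have hvx : x ≠ v := fun h => hmem (h ▸ (PySem.Set.mem_ofList xs v).mp hv)
      show cs v ((xs ++ [x]).count v) = cs v (xs.count v)
      rw [hcnt v, if_neg hvx, Nat.add_zero]
    rw [List.map_congr_left h1]
    simp [S, hcx, cs, iterH]

theorem T_eq_S (A : List Int) : T A (fun _ => 0) = S A := by
  induction A using List.reverseRecOn with
  | nil => rfl
  | append_singleton xs x ih => rw [T_append, S_append, ih, Nat.zero_add]

theorem B_fold (A : List Int) (l : List Int) (r : Int) (hl : ∀ v ∈ l, v ∈ A) :
    (l.map (fun k => (k, (A.count k : Int)))).foldl (fun res p =>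
      ((PySem.List.pyRange 0 (p.2 - 1) 1).foldl
         (fun (s : Int × Int) _ => (ceilHalf s.1, s.2 + ceilHalf s.1))
         (p.1, res + p.1)).2) r
    = r + (l.map (fun v => cs v (A.count v))).sum := by
  induction l generalizing r with
  | nil => simp
  | cons v t ih =>
    have hv1 : 1 ≤ A.count v := List.count_pos_iff.mpr (hl v (List.mem_cons_self))
    have hlen : (PySem.List.pyRange 0 ((A.count v : Int) - 1) 1).length = A.count v - 1 := by
      rw [PySem.List.length_pyRange_one]; omega
    simp only [List.map_cons, List.foldl_cons]
    rw [inner_fold, hlen, ih _ (fun w hw => hl w (List.mem_cons_of_mem _ hw))]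
    have hcsv : cs v (A.count v) = v + cs (ceilHalf v) (A.count v - 1) := by
      have h := cs_front v (A.count v - 1)
      rwa [Nat.sub_add_cancel hv1] at h
    simp only [List.sum_cons, hcsv]
    ring

-- ===== VERDICT (by name: the statement is the Claim_ definition above) =====
theorem solve_spec : Claim_equal_solve := by
  intro A _
  show solve A = solve_alt A
  unfold solve solve_alt
  rw [A_run A 0 PySem.Dict.empty (fun _ => 0) (fun v => by simp [PySem.Dict.get?_empty])]
  simp only [PySem.Dict.foldl_insert_getD_add_one_eq_counter, PySem.Dict.items_counter]
  rw [B_fold A (PySem.Set.ofList A) 0 (fun v hv => (PySem.Set.mem_ofList A v).mp hv)]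
  rw [T_eq_S, S]
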